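-- pv_equiv track=rewrite | github.com/Fondamenti18/fondamenti-di-programmazione | students/1789195/homework04/program01.py | genera_albero_antenati
-- ===== SOURCE A (Python) =====
-- def trova_antenati(albero, nodo, lista):
--     '''Funzione che cerca antenati dei nodi
--     '''
--     for chiave, valore in albero.items():       #scorre chiave, valore del dizionario albero
--         if(nodo in valore):     #se il nodo passato come argomento alla funzione è uguale al valore
--             lista.append(chiave)        #aggiungi alla lista la chiave
--             trova_antenati(albero, chiave, lista)   #chiamata ricorsiva alla funzione, passa come nodo la chiave
--     return(lista)       #ritorna la lista
--
-- def genera_albero_antenati(albero, y):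
--     '''Funzione che cerca gli antenati di grado y di ogni nodo.
--     '''
--     diz_antenati = {}       #dizionario
--     lst_antenati = [] 	#lista
--     for chiave in albero.keys():        #scorre chiavi del dizionario albero
--         lst_antenati = trova_antenati(albero, chiave, lst_antenati) #richiama funzione trova_antenati
--         diz_antenati[chiave] = lst_antenati       #aggiunge al dizionario alla chiave 'chiave' il contenuto della lista
--         lst_antenati = []   #reset lista
--     return(diz_antenati)    #ritorna dizionario
-- ===== SOURCE B (Python) =====
-- def genera_albero_antenati(albero, y):
--     '''Faster: build the child->parents reverse index once, then walk ancestors per key.'''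
--     rev = {}
--     for chiave, valore in albero.items():
--         for v in dict.fromkeys(valore):
--             rev.setdefault(v, []).append(chiave)
--
--     def walk(nodo, acc):
--         for p in rev.get(nodo, ()):
--             acc.append(p)
--             walk(p, acc)
--         return acc
--
--     return {chiave: walk(chiave, []) for chiave in albero}
-- ===== Notes on version B (the rewrite author's own statement) =====
-- stated objective: faster
-- what changed: Instead of rescanning the whole dict for parents at every recursion step for every node, B builds the child->parents reverse index once and then walks ancestors per key through that index, preserving A's append order exactly.
import Mathlib
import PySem

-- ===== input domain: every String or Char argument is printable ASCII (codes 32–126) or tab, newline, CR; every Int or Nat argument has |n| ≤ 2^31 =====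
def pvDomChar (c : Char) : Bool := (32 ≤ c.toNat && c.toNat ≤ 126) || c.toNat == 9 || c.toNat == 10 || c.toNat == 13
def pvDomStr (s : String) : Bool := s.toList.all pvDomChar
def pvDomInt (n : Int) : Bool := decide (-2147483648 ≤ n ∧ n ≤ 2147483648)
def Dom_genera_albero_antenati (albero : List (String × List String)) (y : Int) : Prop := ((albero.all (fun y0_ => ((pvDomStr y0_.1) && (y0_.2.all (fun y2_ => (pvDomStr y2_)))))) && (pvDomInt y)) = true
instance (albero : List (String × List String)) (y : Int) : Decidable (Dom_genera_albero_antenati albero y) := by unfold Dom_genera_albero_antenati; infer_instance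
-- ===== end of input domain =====

-- B replaces A's per-node rescans of the whole dict with one child→parents
-- reverse index built once, then walks ancestors through it (objective: faster).


-- ===== PORT A =====
-- trova_antenati: scans every (chiave, valore) item; if nodo ∈ valore, appends chiave
-- and recurses on chiave.  The Nat argument is fuel making the recursion total;
-- under Pre_ (acyclic parent relation) fuel `albero.length + 1` is never exhausted,
-- so the port computes exactly what the Python computes.
def trovaAntenati (albero : List (String × List String)) : Nat → String → List String → List String
  | 0, _, lista => lista
  | fuel + 1, nodo, lista =>
      albero.foldl
        (fun lista kv =>
          if kv.2.contains nodo then trovaAntenati albero fuel kv.1 (lista ++ [kv.1]) else lista)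
        lista

def genera_albero_antenati (albero : List (String × List String)) (y : Int) : List (String × List String) :=
  (albero.foldl
      (fun diz kv => diz.insert kv.1 (trovaAntenati albero (albero.length + 1) kv.1 []))
      (PySem.Dict.empty : PySem.Dict String (List String))).items

-- ===== PORT B =====
-- rev = {}; for chiave, valore in albero.items(): for v in dict.fromkeys(valore): rev.setdefault(v, []).append(chiave)
def revIndex (albero : List (String × List String)) : PySem.Dict String (List String) :=
  albero.foldl
    (fun rev kv =>
      (PySem.Set.ofList kv.2).foldl (fun rev v => rev.modify v [] (· ++ [kv.1])) rev)
    PySem.Dict.empty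

-- def walk(nodo, acc): for p in rev.get(nodo, ()): acc.append(p); walk(p, acc); return acc
-- (fuel makes the recursion total, as in port A)
def walkAnc (rev : PySem.Dict String (List String)) : Nat → String → List String → List String
  | 0, _, acc => acc
  | fuel + 1, nodo, acc =>
      (rev.getD nodo []).foldl (fun acc p => walkAnc rev fuel p (acc ++ [p])) acc

def genera_albero_antenati_alt (albero : List (String × List String)) (y : Int) : List (String × List String) :=
  let rev := revIndex albero
  (albero.foldl
      (fun d kv => d.insert kv.1 (walkAnc rev (albero.length + 1) kv.1 []))
      (PySem.Dict.empty : PySem.Dict String (List String))).items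

-- ===== PRECONDITION & SPEC =====
-- parents of n: the keys whose value list contains n, in dict order
def pvParents (albero : List (String × List String)) (n : String) : List String :=
  albero.filterMap (fun kv => if kv.2.contains n then some kv.1 else none)

def pvGrow (albero : List (String × List String)) (s : List String) : List String :=
  s.foldl (fun acc n => (pvParents albero n).foldl (fun a p => if a.contains p then a else a ++ [p]) acc) s

def pvReach (albero : List (String × List String)) : Nat → List String → List String
  | 0, s => s
  | m + 1, s => pvReach albero m (pvGrow albero s)

-- Pre_ excludes exactly the inputs where the parent relation is cyclic (some key is
-- its own ancestor): there both Pythons recurse forever (RecursionError), so A never returns.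
def Pre_genera_albero_antenati (albero : List (String × List String)) (y : Int) : Prop :=
  ∀ kv ∈ albero, kv.1 ∉ pvReach albero albero.length (pvParents albero kv.1)

instance (albero : List (String × List String)) (y : Int) : Decidable (Pre_genera_albero_antenati albero y) := by
  unfold Pre_genera_albero_antenati; infer_instance

def pvWitness_genera_albero_antenati : (List (String × List String)) × Int :=
  ([("b", ["a"]), ("c", ["b"])], 0)

def Spec_genera_albero_antenati (albero : List (String × List String)) (y : Int) (out : List (String × List String)) : Prop := out = genera_albero_antenati_alt albero y
instance (albero : List (String × List String)) (y : Int) (out : List (String × List String)) : Decidable (Spec_genera_albero_antenati albero y out) := by unfold Spec_genera_albero_antenati; infer_instance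

-- ===== CLAIM (what is proved, stated in full; the proofs are below) =====
def Claim_equal_genera_albero_antenati : Prop := ∀ (albero : List (String × List String)) (y : Int), Dom_genera_albero_antenati albero y → Pre_genera_albero_antenati albero y → Spec_genera_albero_antenati albero y (genera_albero_antenati albero y)

-- ===== LEMMAS AND PROOFS =====

-- one inner loop of revIndex (over the distinct values of one entry)
lemma revIndex_inner (vs : List String) (k : String) (d : PySem.Dict String (List String)) (n : String) :
    (vs.foldl (fun d v => d.modify v [] (· ++ [k])) d).getD n []
      = d.getD n [] ++ List.replicate (vs.count n) k := by
  induction vs generalizing d with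
  | nil => simp
  | cons v vs ih =>
      simp only [List.foldl_cons, ih, List.count_cons]
      rw [PySem.Dict.getD_modify]
      by_cases h : n = v
      · subst h
        simp only [if_pos trivial, beq_self_eq_true, if_pos rfl, List.append_assoc]
        rw [List.singleton_append, ← List.replicate_succ, List.replicate_succ']
      · have h2 : ¬ v = n := fun e => h e.symm
        simp [h, h2]

lemma revIndex_getD_aux (l : List (String × List String)) (n : String) :
    ∀ (d : PySem.Dict String (List String)),
      (l.foldl (fun rev kv => (PySem.Set.ofList kv.2).foldl (fun rev v => rev.modify v [] (· ++ [kv.1])) rev) d).getD n []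
        = d.getD n [] ++ pvParents l n := by
  induction l with
  | nil => simp [pvParents]
  | cons kv rest ih =>
      intro d
      simp only [List.foldl_cons, ih, revIndex_inner, pvParents, List.filterMap_cons]
      by_cases h : n ∈ kv.2
      · have h1 : (PySem.Set.ofList kv.2).count n = 1 :=
          List.count_eq_one_of_mem (PySem.Set.nodup_ofList kv.2) ((PySem.Set.mem_ofList kv.2 n).2 h)
        simp [h1, h, pvParents]
      · have h1 : (PySem.Set.ofList kv.2).count n = 0 :=
          List.count_eq_zero_of_not_mem (fun hc => h ((PySem.Set.mem_ofList kv.2 n).1 hc))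
        simp [h1, h, pvParents]

lemma revIndex_getD (albero : List (String × List String)) (n : String) :
    (revIndex albero).getD n [] = pvParents albero n := by
  simpa using revIndex_getD_aux albero n PySem.Dict.empty

lemma fold_aux (albero : List (String × List String)) (fuel : Nat)
    (IH : ∀ (n : String) (acc : List String),
      trovaAntenati albero fuel n acc = walkAnc (revIndex albero) fuel n acc)
    (n : String) :
    ∀ (l : List (String × List String)) (acc : List String),
      l.foldl (fun a kv => if kv.2.contains n then trovaAntenati albero fuel kv.1 (a ++ [kv.1]) else a) acc
        = (pvParents l n).foldl (fun a p => walkAnc (revIndex albero) fuel p (a ++ [p])) acc := by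
  intro l
  induction l with
  | nil => intro acc; simp [pvParents]
  | cons kv rest ih =>
      intro acc
      simp only [List.foldl_cons, pvParents, List.filterMap_cons]
      rw [ih]
      by_cases h : kv.2.contains n = true
      · have hm : n ∈ kv.2 := by simpa using h
        rw [if_pos h, IH]
        simp [hm, pvParents]
      · have hm : n ∉ kv.2 := by simpa using h
        rw [if_neg h]
        simp [hm, pvParents]

lemma walk_eq (albero : List (String × List String)) :
    ∀ (fuel : Nat) (n : String) (acc : List String),
      trovaAntenati albero fuel n acc = walkAnc (revIndex albero) fuel n acc := by
  intro fuel
  induction fuel with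
  | zero => intro n acc; rfl
  | succ fuel ih =>
      intro n acc
      rw [trovaAntenati, walkAnc, revIndex_getD]
      exact fold_aux albero fuel ih n albero acc

-- ===== VERDICT (by name: the statement is the Claim_ definition above) =====
theorem genera_albero_antenati_spec : Claim_equal_genera_albero_antenati := by
  intro albero y _ _
  unfold Spec_genera_albero_antenati genera_albero_antenati genera_albero_antenati_alt
  simp only [walk_eq]
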